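-- pv_equiv track=rewrite | github.com/raeez/chiral-bar-cobar | compute/lib/sp4_hochschild_serre.py | generator_loop_degrees
-- ===== SOURCE A (Python) =====
-- from typing import Dict, List, Tuple
--
-- def generator_loop_degrees(exponents: List[int], max_p: int) -> List[int]:
--     """Loop degrees of all LQT generators up to max_p.
--
--     For each exponent e, generators appear at loop degrees
--     2e+1, 2e+3, 2e+5, ... (odd numbers >= 2e+1).
--
--     Returns a sorted list (may contain repeats from different exponents).
--     """
--     gens = []
--     for e in exponents:
--         n = 0
--         while True:
--             d = 2 * e + 1 + 2 * n
--             if d > max_p: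
--                 break
--             gens.append(d)
--             n += 1
--     return sorted(gens)
-- ===== SOURCE B (Python) =====
-- def generator_loop_degrees(exponents, max_p):
--     # Count-by-degree: sort the 2e+1 thresholds once, then walk the odd
--     # degrees upward with a pointer, emitting each degree d once per
--     # threshold <= d.  No final sort of the (possibly huge) output.
--     starts = sorted(2 * e + 1 for e in exponents)
--     if not starts or starts[0] > max_p:
--         return []
--     out = []
--     i = 0
--     d = starts[0]
--     while d <= max_p:
--         while i < len(starts) and starts[i] == d:
--             i += 1
--         out.extend([d] * i)
--         d += 2
--     return out
-- ===== Notes on version B (the rewrite author's own statement) =====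
-- stated objective: faster
-- what changed: Instead of emitting every degree per exponent and sorting the whole output, B sorts only the E thresholds 2e+1 and walks the odd degrees upward with a pointer, emitting each degree with its multiplicity in ascending order, so the final sort of the N-element output disappears.
import Mathlib
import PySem

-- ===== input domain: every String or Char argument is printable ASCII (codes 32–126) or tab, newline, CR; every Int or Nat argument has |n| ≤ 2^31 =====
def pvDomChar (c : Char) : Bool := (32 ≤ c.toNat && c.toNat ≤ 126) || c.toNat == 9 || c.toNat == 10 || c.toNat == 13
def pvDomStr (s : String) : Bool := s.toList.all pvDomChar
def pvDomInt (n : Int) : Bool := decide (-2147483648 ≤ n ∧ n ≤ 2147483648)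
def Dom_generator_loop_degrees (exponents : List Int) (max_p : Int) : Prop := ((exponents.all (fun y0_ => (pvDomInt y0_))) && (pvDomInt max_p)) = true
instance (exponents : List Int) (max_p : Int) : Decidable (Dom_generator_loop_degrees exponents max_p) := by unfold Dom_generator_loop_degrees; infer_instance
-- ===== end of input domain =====

-- B replaces A's emit-everything-then-sort with sorted thresholds plus an ascending
-- pointer walk over the odd degrees, so the final sort of the output disappears (faster).

-- ===== PORT A =====
-- A's inner `while True` loop: n counts up, d = 2*e+1+2*n, append until d > max_p.
-- The loop runs exactly while 2*e+1+2*n ≤ max_p, so fuel (max_p + 1 - (2*e+1)).toNat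
-- (supplied at the call site below) bounds the iteration count; the body is A's.
def aInner (max_p e : Int) : Nat → Int → List Int → List Int
  | 0, _, gens => gens
  | fuel + 1, n, gens =>
    if 2 * e + 1 + 2 * n > max_p then gens
    else aInner max_p e fuel (n + 1) (gens ++ [2 * e + 1 + 2 * n])

def generator_loop_degrees (exponents : List Int) (max_p : Int) : List Int :=
  PySem.List.sorted
    (exponents.foldl (fun gens e => aInner max_p e (max_p + 1 - (2 * e + 1)).toNat 0 gens) [])
    (fun x => x) false

-- ===== PORT B =====
-- B's inner `while i < len(starts) and starts[i] == d` loop: `rem` is the suffix of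
-- `starts` from index i, so advancing the pointer is consuming the head while it equals d.
def bConsume (d : Int) (rem : List Int) (i : Nat) : List Int × Nat :=
  match rem with
  | [] => ([], i)
  | x :: xs => if x = d then bConsume d xs (i + 1) else (x :: xs, i)

-- B's outer `while d <= max_p` loop: out.extend([d] * i); d += 2.  d starts at starts[0]
-- and rises by 2 per iteration, so fuel (max_p + 1 - starts[0]).toNat bounds the count.
def bLoop (max_p : Int) : Nat → Int → List Int → Nat → List Int → List Int
  | 0, _, _, _, out => out
  | fuel + 1, d, rem, i, out =>
    if d > max_p then out
    else
      let p := bConsume d rem i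
      bLoop max_p fuel (d + 2) p.1 p.2 (out ++ List.replicate p.2 d)

def generator_loop_degrees_alt (exponents : List Int) (max_p : Int) : List Int :=
  let starts := PySem.List.sorted (exponents.map (fun e => 2 * e + 1)) (fun x => x) false
  match starts with
  | [] => []
  | s0 :: _ => if s0 > max_p then [] else bLoop max_p (max_p + 1 - s0).toNat s0 starts 0 []

-- ===== PRECONDITION & SPEC =====
def Spec_generator_loop_degrees (exponents : List Int) (max_p : Int) (out : List Int) : Prop := out = generator_loop_degrees_alt exponents max_p
instance (exponents : List Int) (max_p : Int) (out : List Int) : Decidable (Spec_generator_loop_degrees exponents max_p out) := by unfold Spec_generator_loop_degrees; infer_instance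

-- ===== CLAIM (what is proved, stated in full; the proofs are below) =====
def Claim_equal_generator_loop_degrees : Prop := ∀ (exponents : List Int) (max_p : Int), Dom_generator_loop_degrees exponents max_p → Spec_generator_loop_degrees exponents max_p (generator_loop_degrees exponents max_p)

-- ===== LEMMAS AND PROOFS =====

-- The arithmetic progression d, d+2, … ≤ max_p: the common normal form of both loops.
def seqA (max_p d : Int) : List Int :=
  if d > max_p then [] else d :: seqA max_p (d + 2)
termination_by (max_p + 1 - d).toNat
decreasing_by omega

lemma seqA_nil {max_p d : Int} (h : max_p < d) : seqA max_p d = [] := by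
  rw [seqA]; simp [h]

lemma aInner_eq (max_p e : Int) : ∀ (fuel : Nat) (n : Int) (gens : List Int),
    (max_p + 1 - (2 * e + 1 + 2 * n)).toNat ≤ fuel →
    aInner max_p e fuel n gens = gens ++ seqA max_p (2 * e + 1 + 2 * n) := by
  intro fuel
  induction fuel with
  | zero =>
    intro n gens hf
    rw [aInner, seqA_nil (by omega)]
    simp
  | succ fuel ih =>
    intro n gens hf
    rw [aInner]
    by_cases h : 2 * e + 1 + 2 * n > max_p
    · rw [if_pos h, seqA_nil (by omega)]; simp
    · rw [if_neg h, ih (n + 1) _ (by omega)]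
      have h2 : 2 * e + 1 + 2 * (n + 1) = 2 * e + 1 + 2 * n + 2 := by ring
      rw [h2]
      conv_rhs => rw [seqA]
      simp [h]

lemma foldl_aInner_eq (max_p : Int) (exponents : List Int) : ∀ (init : List Int),
    exponents.foldl (fun gens e => aInner max_p e (max_p + 1 - (2 * e + 1)).toNat 0 gens) init
      = init ++ exponents.flatMap (fun e => seqA max_p (2 * e + 1)) := by
  induction exponents with
  | nil => simp
  | cons e es ih =>
    intro init
    rw [List.foldl_cons, ih, aInner_eq max_p e _ 0 init (by omega)]
    norm_num [List.flatMap]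

lemma bConsume_spec (d : Int) : ∀ (rem : List Int) (i : Nat),
    (∀ x ∈ rem, d ≤ x ∧ (x - d) % 2 = 0) → rem.Pairwise (· ≤ ·) →
    ∃ k, (bConsume d rem i).2 = i + k ∧ rem = List.replicate k d ++ (bConsume d rem i).1 ∧
      (∀ x ∈ (bConsume d rem i).1, d + 2 ≤ x ∧ (x - (d + 2)) % 2 = 0) ∧
      (bConsume d rem i).1.Pairwise (· ≤ ·) := by
  intro rem
  induction rem with
  | nil => intro i _ _; exact ⟨0, by simp [bConsume]⟩
  | cons x xs ih =>
    intro i hb hs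
    by_cases hx : x = d
    · subst hx
      have he : bConsume x (x :: xs) i = bConsume x xs (i + 1) := by simp [bConsume]
      rw [he]
      obtain ⟨k, hk1, hk2, hk3, hk4⟩ := ih (i + 1)
        (fun y hy => hb y (List.mem_cons_of_mem _ hy)) (List.Pairwise.of_cons hs)
      refine ⟨k + 1, by omega, ?_, hk3, hk4⟩
      rw [List.replicate_succ, List.cons_append]
      exact congrArg _ hk2
    · have he : bConsume d (x :: xs) i = (x :: xs, i) := by simp [bConsume, hx]
      rw [he]
      refine ⟨0, rfl, by simp, ?_, hs⟩
      intro y hy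
      have hx2 : d + 2 ≤ x := by
        have := hb x (List.mem_cons_self) ; omega
      rcases List.mem_cons.1 hy with rfl | hy'
      · exact ⟨hx2, by have := hb y List.mem_cons_self; omega⟩
      · have hxy : x ≤ y := (List.pairwise_cons.1 hs).1 y hy'
        exact ⟨le_trans hx2 hxy, by have := hb y (List.mem_cons_of_mem _ hy'); omega⟩

lemma flatten_replicate_cons_perm (n : Nat) (a : Int) (l : List Int) :
    (List.replicate n (a :: l)).flatten.Perm (List.replicate n a ++ (List.replicate n l).flatten) := by
  induction n with
  | zero => simp
  | succ n ih =>
    simp only [List.replicate_succ, List.flatten_cons, List.cons_append]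
    refine List.Perm.cons a ?_
    refine (ih.append_left l).trans ?_
    simpa [List.append_assoc] using
      ((List.perm_append_comm (l₁ := l) (l₂ := List.replicate n a)).append_right
        (List.replicate n l).flatten)

lemma flatMap_seqA_nil {max_p d : Int} (rem : List Int) (h : ∀ x ∈ rem, d ≤ x) (hd : max_p < d) :
    rem.flatMap (seqA max_p) = [] := by
  rw [List.flatMap_eq_nil_iff]
  intro x hx
  exact seqA_nil (lt_of_lt_of_le hd (h x hx))

lemma bLoop_perm (max_p : Int) : ∀ (fuel : Nat) (d : Int) (rem : List Int) (i : Nat) (out : List Int),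
    (max_p + 1 - d).toNat ≤ fuel →
    (∀ x ∈ rem, d ≤ x ∧ (x - d) % 2 = 0) → rem.Pairwise (· ≤ ·) →
    (bLoop max_p fuel d rem i out).Perm
      (out ++ (List.replicate i (seqA max_p d)).flatten ++ rem.flatMap (seqA max_p)) := by
  intro fuel
  induction fuel with
  | zero =>
    intro d rem i out hf hb hs
    rw [bLoop, seqA_nil (by omega), flatMap_seqA_nil rem (fun x hx => (hb x hx).1) (by omega)]
    simp
  | succ fuel ih =>
    intro d rem i out hf hb hs
    rw [bLoop]
    by_cases h : d > max_p
    · rw [if_pos h, seqA_nil (by omega),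
        flatMap_seqA_nil rem (fun x hx => (hb x hx).1) (by omega)]
      simp
    · rw [if_neg h]
      obtain ⟨k, hk1, hk2, hk3, hk4⟩ := bConsume_spec d rem i hb hs
      refine (ih (d + 2) _ _ _ (by omega) hk3 hk4).trans ?_
      have hseq : seqA max_p d = d :: seqA max_p (d + 2) := by rw [seqA]; simp [h]
      have hrep : (List.replicate k d).flatMap (seqA max_p)
          = (List.replicate k (seqA max_p d)).flatten := by
        rw [List.flatMap_def, List.map_replicate]
      have e1 := Multiset.coe_eq_coe.2 (flatten_replicate_cons_perm i d (seqA max_p (d + 2)))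
      have e2 := Multiset.coe_eq_coe.2 (flatten_replicate_cons_perm k d (seqA max_p (d + 2)))
      rw [← Multiset.coe_eq_coe]
      conv_rhs => rw [hk2, List.flatMap_append, hrep, hseq]
      rw [hk1]
      simp only [List.replicate_add, List.flatten_append]
      simp only [← Multiset.coe_add] at e1 e2 ⊢
      rw [e1, e2]
      abel

lemma bLoop_sorted (max_p : Int) : ∀ (fuel : Nat) (d : Int) (rem : List Int) (i : Nat) (out : List Int),
    (∀ x ∈ rem, d ≤ x ∧ (x - d) % 2 = 0) → rem.Pairwise (· ≤ ·) →
    out.Pairwise (· ≤ ·) → (∀ x ∈ out, x ≤ d) →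
    (bLoop max_p fuel d rem i out).Pairwise (· ≤ ·) := by
  intro fuel
  induction fuel with
  | zero => intro d rem i out _ _ ho _; rw [bLoop]; exact ho
  | succ fuel ih =>
    intro d rem i out hb hs ho hle
    rw [bLoop]
    by_cases h : d > max_p
    · rw [if_pos h]; exact ho
    · rw [if_neg h]
      obtain ⟨k, hk1, hk2, hk3, hk4⟩ := bConsume_spec d rem i hb hs
      refine ih (d + 2) _ _ _ hk3 hk4 ?_ ?_
      · rw [List.pairwise_append]
        refine ⟨ho, List.pairwise_replicate.2 (by simp), ?_⟩
        intro x hx y hy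
        have := List.eq_of_mem_replicate hy
        subst this
        exact hle x hx
      · intro x hx
        rcases List.mem_append.1 hx with hx | hx
        · have := hle x hx; omega
        · have := List.eq_of_mem_replicate hx; omega

-- ===== VERDICT (by name: the statement is the Claim_ definition above) =====
theorem generator_loop_degrees_spec : Claim_equal_generator_loop_degrees := by
  intro exponents max_p _
  unfold Spec_generator_loop_degrees generator_loop_degrees generator_loop_degrees_alt
  rw [foldl_aInner_eq max_p exponents [], List.nil_append]
  cases hS : PySem.List.sorted (exponents.map (fun e => 2 * e + 1)) (fun x => x) false with
  | nil =>
    have : exponents = [] := by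
      have := (PySem.List.sorted_eq_nil_iff (exponents.map (fun e => 2 * e + 1)) (fun x => x) false).1 hS
      simpa using this
    subst this
    simp [PySem.List.sorted]
  | cons s0 t =>
    dsimp only
    have hmem : ∀ x ∈ s0 :: t, x ∈ exponents.map (fun e => 2 * e + 1) := by
      intro x hx
      exact (PySem.List.mem_sorted _ _ _ x).1 (hS ▸ hx)
    have hlow : ∀ y ∈ exponents.map (fun e => 2 * e + 1), s0 ≤ y := by
      intro y hy
      exact PySem.List.key_head_sorted_le _ (fun x => x) hS y hy
    by_cases h0 : s0 > max_p
    · rw [if_pos h0]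
      have hnil : exponents.flatMap (fun e => seqA max_p (2 * e + 1)) = [] := by
        rw [List.flatMap_eq_nil_iff]
        intro e he
        refine seqA_nil ?_
        have : s0 ≤ 2 * e + 1 := hlow _ (List.mem_map.2 ⟨e, he, rfl⟩)
        omega
      rw [hnil]
      simp [PySem.List.sorted]
    · rw [if_neg h0]
      have hodd : ∀ x ∈ s0 :: t, s0 ≤ x ∧ (x - s0) % 2 = 0 := by
        intro x hx
        obtain ⟨e0, _, he0⟩ := List.mem_map.1 (hmem s0 List.mem_cons_self)
        obtain ⟨e1, _, he1⟩ := List.mem_map.1 (hmem x hx)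
        exact ⟨hlow x (hmem x hx), by omega⟩
      have hpw : (s0 :: t).Pairwise (· ≤ ·) := by
        have := PySem.List.sorted_pairwise (exponents.map (fun e => 2 * e + 1)) (fun x => x)
        rw [hS] at this
        exact this
      refine PySem.List.sorted_id_eq_of_perm_of_pairwise _ _ ?_ ?_
      · have h1 := bLoop_perm max_p (max_p + 1 - s0).toNat s0 (s0 :: t) 0 [] (by omega) hodd hpw
        simp only [List.replicate, List.flatten_nil, List.nil_append, List.append_nil] at h1
        refine h1.trans ?_
        have h2 : (s0 :: t).Perm (exponents.map (fun e => 2 * e + 1)) := hS ▸ PySem.List.sorted_perm _ _ _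
        refine (List.Perm.flatMap_right (seqA max_p) h2).trans ?_
        rw [List.flatMap_map]
      · exact bLoop_sorted max_p (max_p + 1 - s0).toNat s0 (s0 :: t) 0 [] hodd hpw List.Pairwise.nil (by simp)
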